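-- pv_equiv track=rewrite | github.com/simplycode07/aoc-2023 | day9_2.py | get_diff_first
-- ===== SOURCE A (Python) =====
-- def get_diff_first(line):
--     first_elements = [line[0]]
--     while len(set(line)) > 1 or line[0] != 0:
--         for i in range(len(line) - 1):
--             line[i] = line[i+1] - line[i]
--
--         line.pop()
--         first_elements.append(line[0])
--
--     return first_elements
-- ===== SOURCE B (Python) =====
-- # B: recursion over fresh difference rows (return-value equivalent; unlike A it
-- # does not mutate the argument in place).
-- def get_diff_first(line):
--     if all(v == 0 for v in line):
--         return [line[0]]
--     return [line[0]] + get_diff_first([b - a for a, b in zip(line, line[1:])])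
-- ===== Notes on version B (the rewrite author's own statement) =====
-- stated objective: simpler
-- what changed: A's while-loop that repeatedly rewrites the list in place (indexed for-loop plus pop) is replaced by a structural recursion that builds a fresh difference row with zip and prepends the first element; B does not mutate its argument (return values are identical).
import Mathlib
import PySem

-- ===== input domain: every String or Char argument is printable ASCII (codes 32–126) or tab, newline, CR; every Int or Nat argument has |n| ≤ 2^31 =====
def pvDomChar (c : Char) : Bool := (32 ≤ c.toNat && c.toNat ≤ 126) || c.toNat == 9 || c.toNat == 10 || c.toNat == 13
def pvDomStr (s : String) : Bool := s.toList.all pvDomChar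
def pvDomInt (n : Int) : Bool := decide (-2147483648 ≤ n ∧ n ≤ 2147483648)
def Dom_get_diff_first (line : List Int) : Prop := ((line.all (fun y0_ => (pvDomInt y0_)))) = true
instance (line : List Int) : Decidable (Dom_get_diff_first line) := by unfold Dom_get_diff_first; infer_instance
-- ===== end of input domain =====

-- B changes the decomposition: recursion over fresh difference rows instead of A's
-- in-place while/for mutation loop; equivalence is about the RETURN value only
-- (A mutates its argument in place, B does not).

-- ===== PORT A =====
-- for i in range(len(line)-1): line[i] = line[i+1] - line[i];  line.pop()
-- (the loop indices are in range, pySetD/pyGetD are exact here; pop's value is discarded → dropLast)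
def stepA (line : List Int) : List Int :=
  ((PySem.List.pyRange 0 ((line.length : Int) - 1) 1).foldl
      (fun l i => PySem.List.pySetD l i (PySem.List.pyGetD l (i + 1) 0 - PySem.List.pyGetD l i 0))
      line).dropLast

-- port needs this for termination (the row shrinks by one each pass)
theorem stepA_length (line : List Int) : (stepA line).length = line.length - 1 := by
  unfold stepA
  rw [List.length_dropLast]
  have h : ∀ (r : List Int) (l : List Int),
      (r.foldl (fun l i => PySem.List.pySetD l i (PySem.List.pyGetD l (i + 1) 0 - PySem.List.pyGetD l i 0)) l).length
        = l.length := by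
    intro r
    induction r with
    | nil => intro l; rfl
    | cons x t ih => intro l; simp [List.foldl_cons, ih, PySem.List.length_pySetD]
  rw [h]

-- while len(set(line)) > 1 or line[0] != 0: …  first_elements.append(line[0])
def loopA (line acc : List Int) : List Int :=
  if h : (PySem.Set.ofList line).length > 1 ∨ PySem.List.pyGetD line 0 0 ≠ 0 then
    let l' := stepA line
    loopA l' (acc ++ [PySem.List.pyGetD l' 0 0])
  else acc
termination_by line.length
decreasing_by
  have hne : line ≠ [] := by
    intro hnil; subst hnil
    rcases h with h | h
    · simp [PySem.Set.ofList] at h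
    · simp [PySem.List.pyGetD, PySem.List.pyGet?] at h
  have : 1 ≤ line.length := List.length_pos_iff.mpr hne
  simp only [stepA_length]; omega

def get_diff_first (line : List Int) : List Int :=
  loopA line [PySem.List.pyGetD line 0 0]

-- ===== PORT B =====
def get_diff_first_alt (line : List Int) : List Int :=
  if line.all (fun v => v == 0) then [PySem.List.pyGetD line 0 0]
  else
    PySem.List.pyGetD line 0 0 ::
      get_diff_first_alt (List.zipWith (fun a b => b - a) line line.tail)
termination_by line.length
decreasing_by
  have hne : line ≠ [] := by
    intro hnil; subst hnil; simp at *
  have : 1 ≤ line.length := List.length_pos_iff.mpr hne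
  simp [List.length_zipWith]; omega

-- ===== PRECONDITION & SPEC =====
-- one difference level, used by Pre_ to state A's termination in closed form
def diffRow (l : List Int) : List Int := List.zipWith (fun a b => b - a) l l.tail

-- Pre_ excludes exactly the inputs on which A raises IndexError (B raises there too):
-- the empty list, and lists whose difference rows never reach an all-zero row
-- (equivalently, whose (n-1)-th difference row is not the singleton zero row).
def Pre_get_diff_first (line : List Int) : Prop :=
  line ≠ [] ∧ diffRow^[line.length - 1] line = [0]
instance (line : List Int) : Decidable (Pre_get_diff_first line) := by
  unfold Pre_get_diff_first; infer_instance

def pvWitness_get_diff_first : List Int := [1, 3, 6, 10]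

def Spec_get_diff_first (line : List Int) (out : List Int) : Prop := out = get_diff_first_alt line
instance (line : List Int) (out : List Int) : Decidable (Spec_get_diff_first line out) := by unfold Spec_get_diff_first; infer_instance

-- ===== CLAIM (what is proved, stated in full; the proofs are below) =====
def Claim_equal_get_diff_first : Prop := ∀ (line : List Int), Dom_get_diff_first line → Pre_get_diff_first line → Spec_get_diff_first line (get_diff_first line)

-- ===== LEMMAS AND PROOFS =====

theorem diffRow_length (l : List Int) : (diffRow l).length = l.length - 1 := by
  simp [diffRow, List.length_zipWith]

theorem diffRow_getElem (l : List Int) (k : Nat) (h : k < (diffRow l).length) :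
    (diffRow l)[k] = l[k+1]'(by have := diffRow_length l; omega) - l[k]'(by have := diffRow_length l; omega) := by
  simp [diffRow, List.getElem_zipWith, List.getElem_tail]

theorem inv_foldl (l : List Int) : ∀ (k : Nat), k ≤ l.length - 1 →
    ((List.map Int.ofNat (List.range k)).foldl
      (fun acc i => PySem.List.pySetD acc i (PySem.List.pyGetD acc (i + 1) 0 - PySem.List.pyGetD acc i 0)) l)
      = (diffRow l).take k ++ l.drop k := by
  intro k
  induction k with
  | zero => intro _; simp
  | succ k ih =>
    intro hk
    have hk' : k ≤ l.length - 1 := by omega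
    have hkl : k < l.length := by omega
    have hk1 : k + 1 < l.length := by omega
    rw [List.range_succ, List.map_append, List.foldl_append, ih hk']
    simp only [List.map_cons, List.map_nil, List.foldl_cons, List.foldl_nil]
    have hdl : (diffRow l).length = l.length - 1 := diffRow_length l
    have htk : ((diffRow l).take k).length = k := by rw [List.length_take]; omega
    -- rewrite the drop as explicit conses
    have hd1 : l.drop k = l[k] :: l.drop (k+1) := (List.drop_eq_getElem_cons hkl).symm ▸ rfl
    have hd2 : l.drop (k+1) = l[k+1] :: l.drop (k+2) := (List.drop_eq_getElem_cons hk1).symm ▸ rfl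
    rw [hd1, hd2]
    simp only [Int.ofNat_eq_natCast]
    have hcast : ((k : Int) : Int) + 1 = ((k+1 : Nat) : Int) := by push_cast; ring
    rw [hcast, PySem.List.pyGetD_natCast, PySem.List.pyGetD_natCast, PySem.List.pySetD_natCast]
    -- getD values
    have g1 : ((diffRow l).take k ++ l[k] :: l[k+1] :: l.drop (k+2)).getD (k+1) 0 = l[k+1] := by
      simp [List.getD, List.getElem?_append_right, htk, List.getElem?_eq_getElem hk1]
    have g2 : ((diffRow l).take k ++ l[k] :: l[k+1] :: l.drop (k+2)).getD k 0 = l[k] := by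
      simp [List.getD, List.getElem?_append_right, htk, List.getElem?_eq_getElem hkl]
    rw [g1, g2]
    -- set
    rw [List.set_append]
    simp only [htk]
    have : ¬ (k < k) := by omega
    rw [if_neg this]
    simp only [Nat.sub_self, List.set_cons_zero]
    have htake : (diffRow l).take (k+1) = (diffRow l).take k ++ [(diffRow l)[k]'(by omega)] := by
      rw [List.take_add_one]
      simp [List.getElem?_eq_getElem (show k < (diffRow l).length by omega)]
    rw [htake, diffRow_getElem l k (by omega)]
    simp [List.append_assoc]

theorem pyRange_zero_ofNat (n : Nat) :
    PySem.List.pyRange 0 (n : Int) 1 = List.map Int.ofNat (List.range n) := by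
  rw [PySem.List.pyRange_one]
  simp [Int.ofNat_eq_natCast]

theorem stepA_eq (l : List Int) : stepA l = diffRow l := by
  unfold stepA
  rcases l with _ | ⟨x, t⟩
  · simp [PySem.List.pyRange_one_eq_nil, diffRow]
  · have hlen : ((x :: t).length : Int) - 1 = (t.length : Int) := by simp
    rw [hlen, pyRange_zero_ofNat, inv_foldl (x :: t) t.length (by simp)]
    have hd : (diffRow (x :: t)).length = t.length := by rw [diffRow_length]; simp
    rw [List.take_of_length_le (by omega)]
    have hdrop : (x :: t).drop t.length = [(x :: t).getLast (by simp)] := by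
      have : t.length = (x :: t).length - 1 := by simp
      rw [this, List.drop_length_sub_one (by simp)]
    rw [hdrop, List.dropLast_concat]

theorem one_lt_length_of_two_mem {α : Type} (s : List α) (a b : α)
    (ha : a ∈ s) (hb : b ∈ s) (hab : a ≠ b) : 1 < s.length := by
  rcases s with _ | ⟨c, _ | ⟨d, t⟩⟩
  · simp at ha
  · simp at ha hb; simp [ha, hb] at hab
  · simp

theorem ofList_replicate_zero (n : Nat) :
    PySem.Set.ofList (List.replicate (n + 1) (0 : Int)) = [0] := by
  induction n with
  | zero => decide
  | succ n ih =>
    rw [List.replicate_succ, PySem.Set.ofList_cons, ih]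
    decide

theorem condA_iff (l : List Int) (hne : l ≠ []) :
    ((PySem.Set.ofList l).length > 1 ∨ PySem.List.pyGetD l 0 0 ≠ 0) ↔
      ¬ (l.all (fun v => v == 0) = true) := by
  rcases l with _ | ⟨x, t⟩
  · exact absurd rfl hne
  constructor
  · intro h hall
    simp only [List.all_cons, Bool.and_eq_true, beq_iff_eq, List.all_eq_true] at hall
    obtain ⟨hx, ht⟩ := hall
    have hrep : x :: t = List.replicate (t.length + 1) (0 : Int) := by
      rw [List.replicate_succ, hx]
      congr 1
      exact List.eq_replicate_of_mem ht
    rcases h with h | h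
    · rw [hrep, ofList_replicate_zero] at h
      simp at h
    · apply h
      simp [PySem.List.pyGetD, PySem.List.pyGet?, PySem.List.pyIdx?, hx]
  · intro h
    by_cases hx : x = 0
    · left
      simp only [List.all_cons, Bool.and_eq_true, beq_iff_eq, List.all_eq_true] at h
      push Not at h
      obtain ⟨v, hv, hvne⟩ := h hx
      exact one_lt_length_of_two_mem _ (0 : Int) v
        (by rw [PySem.Set.mem_ofList]; exact hx ▸ List.mem_cons_self)
        (by rw [PySem.Set.mem_ofList]; exact List.mem_cons_of_mem _ hv)
        (Ne.symm hvne)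
    · right
      simp [PySem.List.pyGetD, PySem.List.pyGet?, PySem.List.pyIdx?, hx]

theorem alt_head (l : List Int) :
    get_diff_first_alt l = PySem.List.pyGetD l 0 0 :: (get_diff_first_alt l).tail := by
  rw [get_diff_first_alt]
  split <;> rfl

theorem loop_eq (n : Nat) : ∀ (line acc : List Int), line.length ≤ n → line ≠ [] →
    diffRow^[line.length - 1] line = [0] →
    loopA line acc = acc ++ (get_diff_first_alt line).tail := by
  induction n with
  | zero =>
    intro line acc hlen hne _
    have := List.length_pos_iff.mpr hne
    omega
  | succ n ih =>
    intro line acc hlen hne hterm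
    rw [loopA]
    by_cases hall : line.all (fun v => v == 0) = true
    · rw [dif_neg (by rw [condA_iff line hne]; simp [hall])]
      rw [get_diff_first_alt, if_pos hall]
      simp
    · have hcond := (condA_iff line hne).mpr (by simp [hall])
      rw [dif_pos hcond]
      simp only [stepA_eq]
      have hlp : 1 ≤ line.length := List.length_pos_iff.mpr hne
      have hlen2 : 2 ≤ line.length := by
        by_contra hcon
        have h1 : line.length = 1 := by omega
        rw [h1] at hterm
        simp only [Nat.sub_self, Function.iterate_zero, id] at hterm
        rw [hterm] at hall
        simp at hall
      have hdlen := diffRow_length line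
      have hdne : diffRow line ≠ [] := by
        intro hnil
        rw [hnil] at hdlen
        simp at hdlen
        omega
      have hterm' : diffRow^[(diffRow line).length - 1] (diffRow line) = [0] := by
        rw [hdlen]
        have hsucc : line.length - 1 - 1 + 1 = line.length - 1 := by omega
        calc diffRow^[line.length - 1 - 1] (diffRow line)
            = diffRow^[line.length - 1 - 1 + 1] line := (Function.iterate_succ_apply diffRow _ line).symm
          _ = [0] := by rw [hsucc]; exact hterm
      rw [ih (diffRow line) _ (by omega) hdne hterm']
      conv_rhs => rw [get_diff_first_alt, if_neg hall]
      simp only [List.tail_cons, List.append_assoc, List.singleton_append]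
      rw [← alt_head (diffRow line)]
      rfl

-- ===== VERDICT (by name: the statement is the Claim_ definition above) =====
theorem get_diff_first_spec : Claim_equal_get_diff_first := by
  intro line _ hpre
  unfold Spec_get_diff_first get_diff_first
  rw [loop_eq line.length line _ le_rfl hpre.1 hpre.2]
  rw [alt_head line]
  rfl
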